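-- pv_equiv track=rewrite | github.com/phantom4C3/Mango-SEO-Incomplete | onpageseo-service/app/utils/scorer.py | _has_proper_heading_hierarchy
-- ===== SOURCE A (Python) =====
-- from typing import Dict, List, Optional
--
-- def _has_proper_heading_hierarchy(headings: Dict[str, List[str]]) -> bool:
--     """Check if headings follow proper hierarchy"""
--
--     if not headings:
--         return True
--
--
--     levels = ["h1", "h2", "h3", "h4", "h5", "h6"]
--     found_levels = [level for level in levels if headings.get(level)]
--
--     # Ensure no gaps in hierarchy (e.g., h1 → h3 without h2)
--     if len(found_levels) > 1:
--         first_index = levels.index(found_levels[0])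
--         last_index = levels.index(found_levels[-1])
--         expected_levels = levels[first_index : last_index + 1]
--         return all(level in found_levels for level in expected_levels)
--
--     return True
-- ===== SOURCE B (Python) =====
-- def _has_proper_heading_hierarchy(headings):
--     """Check if headings follow proper hierarchy"""
--     if not headings:
--         return True
--     started = False
--     gap = False
--     for level in ("h1", "h2", "h3", "h4", "h5", "h6"):
--         if headings.get(level):
--             if gap:
--                 return False
--             started = True
--         elif started:
--             gap = True
--     return True
-- ===== Notes on version B (the rewrite author's own statement) =====
-- stated objective: simpler
-- what changed: B is a single streaming pass over the six levels with a two-flag state machine (started/gap) that rejects the moment a present level follows a gap, instead of collecting found_levels, slicing the expected range and testing membership of each.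
import Mathlib
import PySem

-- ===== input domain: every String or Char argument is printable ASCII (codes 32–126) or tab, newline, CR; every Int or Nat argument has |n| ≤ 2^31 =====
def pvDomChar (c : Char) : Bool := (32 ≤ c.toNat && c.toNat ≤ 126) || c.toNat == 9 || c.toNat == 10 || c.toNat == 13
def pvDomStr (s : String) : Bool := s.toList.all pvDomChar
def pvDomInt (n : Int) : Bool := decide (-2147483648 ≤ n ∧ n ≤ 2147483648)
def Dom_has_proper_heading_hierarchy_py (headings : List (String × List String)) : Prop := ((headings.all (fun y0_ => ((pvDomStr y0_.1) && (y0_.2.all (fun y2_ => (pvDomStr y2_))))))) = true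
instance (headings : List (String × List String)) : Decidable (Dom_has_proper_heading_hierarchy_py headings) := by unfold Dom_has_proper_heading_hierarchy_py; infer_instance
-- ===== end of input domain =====

-- B replaces A's collect/slice/membership check by one streaming pass with a
-- two-flag state machine (started/gap), rejecting on a present level after a gap
-- (objective: simpler).

-- ===== PORT A =====
-- truthiness of headings.get(level): None and [] are falsy
def pvTruthy : Option (List String) → Bool
  | none => false
  | some xs => !xs.isEmpty

def has_proper_heading_hierarchy_py (headings : List (String × List String)) : Bool :=
  if headings.isEmpty then true
  else
    let d := PySem.Dict.ofList headings
    let levels : List String := ["h1", "h2", "h3", "h4", "h5", "h6"]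
    let found_levels := levels.filter (fun level => pvTruthy (d.get? level))
    if 1 < found_levels.length then
      -- found_levels[0], found_levels[-1] cannot raise here (length > 1)
      let first_index := (PySem.List.index? levels ((PySem.List.pyGet? found_levels 0).getD "")).getD 0
      let last_index := (PySem.List.index? levels ((PySem.List.pyGet? found_levels (-1)).getD "")).getD 0
      let expected_levels := PySem.List.slice levels (some (first_index : Int)) (some ((last_index : Int) + 1))
      expected_levels.all (fun level => found_levels.contains level)
    else true

-- ===== PORT B =====
-- the for-loop of Source B with its early `return False`: structural recursion over the
-- remaining levels, carrying the two flags (started, gap)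
def altLoop (d : PySem.Dict String (List String)) :
    List String → Bool → Bool → Bool
  | [], _, _ => true
  | level :: rest, started, gap =>
    if pvTruthy (d.get? level) then
      if gap then false else altLoop d rest true gap
    else
      altLoop d rest started (if started then true else gap)

def has_proper_heading_hierarchy_py_alt (headings : List (String × List String)) : Bool :=
  if headings.isEmpty then true
  else
    altLoop (PySem.Dict.ofList headings)
      ["h1", "h2", "h3", "h4", "h5", "h6"] false false

-- ===== PRECONDITION & SPEC =====
def Spec_has_proper_heading_hierarchy_py (headings : List (String × List String)) (out : Bool) : Prop := out = has_proper_heading_hierarchy_py_alt headings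
instance (headings : List (String × List String)) (out : Bool) : Decidable (Spec_has_proper_heading_hierarchy_py headings out) := by unfold Spec_has_proper_heading_hierarchy_py; infer_instance

-- ===== CLAIM (what is proved, stated in full; the proofs are below) =====
def Claim_equal_has_proper_heading_hierarchy_py : Prop := ∀ (headings : List (String × List String)), Dom_has_proper_heading_hierarchy_py headings → Spec_has_proper_heading_hierarchy_py headings (has_proper_heading_hierarchy_py headings)

-- ===== LEMMAS AND PROOFS =====

-- Both programs are determined by the six truthiness bits of the lookups at
-- "h1".."h6"; abstract those bits and check all 64 cases.
theorem core_eq (d : PySem.Dict String (List String)) :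
    (let levels : List String := ["h1", "h2", "h3", "h4", "h5", "h6"]
     let found_levels := levels.filter (fun level => pvTruthy (d.get? level))
     if 1 < found_levels.length then
       let first_index := (PySem.List.index? levels ((PySem.List.pyGet? found_levels 0).getD "")).getD 0
       let last_index := (PySem.List.index? levels ((PySem.List.pyGet? found_levels (-1)).getD "")).getD 0
       let expected_levels := PySem.List.slice levels (some (first_index : Int)) (some ((last_index : Int) + 1))
       expected_levels.all (fun level => found_levels.contains level)
     else true)
    = altLoop d ["h1", "h2", "h3", "h4", "h5", "h6"] false false := by
  simp only [altLoop, List.filter]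
  cases pvTruthy (d.get? "h1") <;> cases pvTruthy (d.get? "h2") <;>
    cases pvTruthy (d.get? "h3") <;> cases pvTruthy (d.get? "h4") <;>
    cases pvTruthy (d.get? "h5") <;> cases pvTruthy (d.get? "h6") <;> decide

-- ===== VERDICT (by name: the statement is the Claim_ definition above) =====
theorem has_proper_heading_hierarchy_py_spec : Claim_equal_has_proper_heading_hierarchy_py := by
  intro headings _
  unfold Spec_has_proper_heading_hierarchy_py
  unfold has_proper_heading_hierarchy_py has_proper_heading_hierarchy_py_alt
  by_cases h : headings.isEmpty
  · simp [h]
  · simp only [h, if_false, Bool.false_eq_true]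
    exact core_eq (PySem.Dict.ofList headings)
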